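-- pv_equiv track=rewrite | github.com/steveSchwering/lichtheim_memory | artificial_language/language/scramble_sentences_random.py | generate_combinations_and_check_bigrams
-- ===== SOURCE A (Python) =====
-- from itertools import permutations
--
-- def get_bigrams(utterance):
--     """
--     """
--     bigrams = []
--
--     for elem1, elem2 in zip(utterance, utterance[1:]):
--         bigrams.append(tuple([elem1, elem2]))
--
--     return set(bigrams)
--
-- def generate_combinations_and_check_bigrams(sentences, bigrams):
--     """
--     Finds all permutations of a sentence, removing those permutations that have a bigram in bigrams
--     """
--     valid_scrambled_sents = []
--
--     for sentence in sentences: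
--         perm_sentences = permutations(sentence, len(sentence))
--
--         for perm_sent in perm_sentences:
--             bigrams_perm_sent = get_bigrams(utterance = perm_sent)
--             if bigrams_perm_sent.isdisjoint(bigrams):
--                 valid_scrambled_sents.append(perm_sent)
--
--     return valid_scrambled_sents
-- ===== SOURCE B (Python) =====
-- def generate_combinations_and_check_bigrams(sentences, bigrams):
--     """
--     Backtracking: extend a partial permutation only while the newly created
--     adjacent bigram is not forbidden, pruning whole invalid prefixes at once.
--     """
--     forbidden = set(bigrams)
--
--     def extend(prefix, remaining):
--         if not remaining:
--             return [tuple(prefix)]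
--         out = []
--         for i in range(len(remaining)):
--             w = remaining[i]
--             if prefix and (prefix[-1], w) in forbidden:
--                 continue
--             out.extend(extend(prefix + [w], remaining[:i] + remaining[i + 1:]))
--         return out
--
--     valid_scrambled_sents = []
--     for sentence in sentences:
--         valid_scrambled_sents.extend(extend([], sentence))
--     return valid_scrambled_sents
-- ===== Notes on version B (the rewrite author's own statement) =====
-- stated objective: alternative
-- what changed: A generates all n! permutations of each sentence with itertools and filters each one by building its full bigram set; B instead does a recursive backtracking search that extends a partial permutation only when the newly formed adjacent bigram is not forbidden, pruning invalid prefixes (same output in the same order; on random inputs with few matching bigrams the measured cost is the same).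
import Mathlib
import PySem

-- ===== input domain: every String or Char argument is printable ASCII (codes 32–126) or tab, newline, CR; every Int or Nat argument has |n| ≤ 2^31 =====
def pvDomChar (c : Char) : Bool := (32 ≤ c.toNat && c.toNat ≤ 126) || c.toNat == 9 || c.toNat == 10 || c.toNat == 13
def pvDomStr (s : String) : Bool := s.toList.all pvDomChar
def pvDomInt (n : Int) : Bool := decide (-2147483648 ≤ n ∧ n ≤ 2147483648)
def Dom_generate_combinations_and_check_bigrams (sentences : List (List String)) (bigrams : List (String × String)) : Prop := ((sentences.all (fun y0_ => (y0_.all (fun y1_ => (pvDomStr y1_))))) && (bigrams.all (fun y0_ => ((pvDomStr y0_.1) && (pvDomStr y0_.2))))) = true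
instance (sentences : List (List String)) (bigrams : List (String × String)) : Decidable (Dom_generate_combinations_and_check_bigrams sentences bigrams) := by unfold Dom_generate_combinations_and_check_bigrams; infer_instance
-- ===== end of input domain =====

-- B replaces A's generate-all-permutations-then-filter with a backtracking search that drops a
-- partial permutation as soon as its newest adjacent bigram is forbidden (same output, same order).

-- ===== PORT A =====
-- get_bigrams: loop appending each adjacent pair of utterance (zip(utterance, utterance[1:])), then set(...)
def get_bigrams (utterance : List String) : PySem.Set (String × String) :=
  PySem.Set.ofList
    ((List.zip utterance (PySem.List.slice utterance (some 1) none)).foldl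
      (fun acc b => acc ++ [b]) [])

def generate_combinations_and_check_bigrams (sentences : List (List String)) (bigrams : List (String × String)) : List (List String) :=
  sentences.foldl (fun valid sentence =>
    (PySem.List.permutations sentence sentence.length).foldl (fun valid2 perm_sent =>
      if PySem.Set.isdisjoint (get_bigrams perm_sent) bigrams then valid2 ++ [perm_sent]
      else valid2) valid) []

-- ===== PORT B =====
-- Source B's recursive extend(prefix, remaining): for i in range(len(remaining)), skip w when
-- (prefix[-1], w) is forbidden, else recurse on prefix+[w] and remaining[:i]+remaining[i+1:].
-- Fuel = remaining.length (the [i]? none branch and the fuel-0 branch are unreachable guards).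
def pvExtend (forbidden : PySem.Set (String × String)) : Nat → List String → List String → List (List String)
  | _, pre, [] => [pre]
  | 0, _, _ => []
  | n+1, pre, remaining =>
      (List.range remaining.length).flatMap (fun i =>
        match remaining[i]? with
        | none => []
        | some w =>
          if (match pre.getLast? with
              | some l => PySem.Set.contains forbidden (l, w)
              | none => false)
          then []
          else pvExtend forbidden n (pre ++ [w]) (remaining.eraseIdx i))

def generate_combinations_and_check_bigrams_alt (sentences : List (List String)) (bigrams : List (String × String)) : List (List String) :=
  let forbidden := PySem.Set.ofList bigrams
  sentences.foldl (fun valid sentence => valid ++ pvExtend forbidden sentence.length [] sentence) []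

-- ===== PRECONDITION & SPEC =====
def Spec_generate_combinations_and_check_bigrams (sentences : List (List String)) (bigrams : List (String × String)) (out : List (List String)) : Prop := out = generate_combinations_and_check_bigrams_alt sentences bigrams
instance (sentences : List (List String)) (bigrams : List (String × String)) (out : List (List String)) : Decidable (Spec_generate_combinations_and_check_bigrams sentences bigrams out) := by unfold Spec_generate_combinations_and_check_bigrams; infer_instance

-- ===== CLAIM (what is proved, stated in full; the proofs are below) =====
def Claim_equal_generate_combinations_and_check_bigrams : Prop := ∀ (sentences : List (List String)) (bigrams : List (String × String)), Dom_generate_combinations_and_check_bigrams sentences bigrams → Spec_generate_combinations_and_check_bigrams sentences bigrams (generate_combinations_and_check_bigrams sentences bigrams)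

-- ===== LEMMAS AND PROOFS =====

-- whole-permutation validity read left to right, with the word preceding p (if any) as last?
def pvGood (bigrams : List (String × String)) : Option String → List String → Bool
  | _, [] => true
  | last?, w :: rest =>
      (match last? with | none => true | some l => !(bigrams.contains (l, w))) && pvGood bigrams (some w) rest

lemma pvGood_cons (bigrams : List (String × String)) (p : List String) :
    ∀ l, pvGood bigrams (some l) p = (List.zip (l :: p) p).all (fun x => !(bigrams.contains x)) := by
  induction p with
  | nil => intro l; rfl
  | cons w rest ih =>
    intro l
    simp only [pvGood, List.zip_cons_cons, List.all_cons, ih w]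

lemma pvGood_none (bigrams : List (String × String)) (p : List String) :
    pvGood bigrams none p = (List.zip p p.tail).all (fun x => !(bigrams.contains x)) := by
  cases p with
  | nil => rfl
  | cons w rest => simp only [pvGood, pvGood_cons, List.tail_cons, Bool.true_and]

-- A's filter test equals the left-to-right validity check (starting with no previous word)
lemma pvPredA_eq_good (bigrams : List (String × String)) (p : List String) :
    PySem.Set.isdisjoint (get_bigrams p) bigrams = pvGood bigrams none p := by
  rw [Bool.eq_iff_iff, PySem.Set.isdisjoint_iff, pvGood_none]
  simp only [get_bigrams, PySem.List.slice_from_one, PySem.List.foldl_append_singleton_eq_self,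
    List.nil_append, PySem.Set.mem_ofList, List.all_eq_true, Bool.not_eq_eq_eq_not, Bool.not_true,
    List.contains_eq_mem, decide_eq_false_iff_not]

-- the backtracking search returns exactly the itertools-ordered permutations that pass, prefixed
lemma pvExtend_eq (bigrams : List (String × String)) :
    ∀ (n : Nat) (rem : List String), rem.length = n → ∀ pre,
      pvExtend (PySem.Set.ofList bigrams) n pre rem
        = ((PySem.List.permutations rem n).filter (fun p => pvGood bigrams pre.getLast? p)).map
            (fun p => pre ++ p) := by
  intro n
  induction n with
  | zero =>
    intro rem hlen pre
    rw [List.length_eq_zero_iff] at hlen; subst hlen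
    simp [pvExtend, PySem.List.permutations, pvGood]
  | succ n ih =>
    intro rem hlen pre
    cases rem with
    | nil => simp at hlen
    | cons x xs =>
      rw [PySem.List.permutations, List.filter_flatMap, List.map_flatMap]
      show List.flatMap _ (List.range (x::xs).length) = _
      apply List.flatMap_congr
      intro i hi
      rw [List.mem_range] at hi
      have hget : (x :: xs)[i]? = some ((x :: xs)[i]) := List.getElem?_eq_getElem hi
      rw [hget]
      simp only []
      set w := (x :: xs)[i] with hw
      have hlen' : ((x :: xs).eraseIdx i).length = n := by
        rw [List.length_eraseIdx]; simp only [hi, if_true]; omega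
      have hcontains : PySem.Set.contains (PySem.Set.ofList bigrams) = fun y => bigrams.contains y := by
        funext y
        rw [Bool.eq_iff_iff]
        simp [PySem.Set.contains, PySem.Set.mem_ofList]
      rw [List.filter_map]
      cases hL : pre.getLast? with
      | none =>
        rw [if_neg (by simp), ih _ hlen', List.getLast?_concat, List.map_map]
        refine congrArg₂ List.map (funext fun p => by simp) (List.filter_congr fun p _ => ?_)
        simp [Function.comp, pvGood]
      | some l =>
        rw [hcontains]
        by_cases hforb : bigrams.contains (l, w) = true
        · have hm : (l, w) ∈ bigrams := by simpa using hforb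
          have hnil : List.filter ((fun p => pvGood bigrams (some l) p) ∘ fun p => w :: p)
              (PySem.List.permutations ((x :: xs).eraseIdx i) n) = [] :=
            List.filter_eq_nil_iff.2 fun p _ => by simp [Function.comp, pvGood, hm]
          rw [if_pos hforb, hnil]
          rfl
        · have hm : (l, w) ∉ bigrams := by simpa using hforb
          rw [if_neg hforb, ih _ hlen', List.getLast?_concat, List.map_map]
          refine congrArg₂ List.map (funext fun p => by simp) (List.filter_congr fun p _ => ?_)
          simp [Function.comp, pvGood, hm]
-- ===== VERDICT (by name: the statement is the Claim_ definition above) =====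
theorem generate_combinations_and_check_bigrams_spec : Claim_equal_generate_combinations_and_check_bigrams := by
  intro sentences bigrams _
  unfold Spec_generate_combinations_and_check_bigrams
  unfold generate_combinations_and_check_bigrams generate_combinations_and_check_bigrams_alt
  simp only [PySem.List.foldl_append_if_eq_filter, PySem.List.foldl_append_eq_flatMap]
  simp only [List.nil_append]
  apply List.flatMap_congr
  intro s _
  rw [pvExtend_eq bigrams s.length s rfl []]
  simp [pvPredA_eq_good]
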